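-- pv_equiv track=rewrite | github.com/dtomic28/Sandbox | preverjanjeZnanjaNPR_10_12_2020.py | notranja
-- ===== SOURCE A (Python) =====
-- def notranja(st,j,i):
--     if j == st:
--         return ""
--     else:
--         if i+j == st-1 or i==j or st//2 == i or st//2 == j:
--             return "1 " + notranja(st,j+1,i)
--         else:
--             return "0 " + notranja(st,j+1,i)
-- ===== SOURCE B (Python) =====
-- def notranja(st, j, i):
--     half = st // 2
--     parts = []
--     for k in range(j, st):
--         if i + k == st - 1 or i == k or half == i or half == k:
--             parts.append("1 ")
--         else:
--             parts.append("0 ")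
--     return "".join(parts)
-- ===== Notes on version B (the rewrite author's own statement) =====
-- stated objective: idiomatic
-- what changed: Replaced the string-building recursion (one stack frame per cell) by an iterative loop over range(j, st) that collects '1 '/'0 ' parts with a hoisted st//2 and joins them once.
import Mathlib
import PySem

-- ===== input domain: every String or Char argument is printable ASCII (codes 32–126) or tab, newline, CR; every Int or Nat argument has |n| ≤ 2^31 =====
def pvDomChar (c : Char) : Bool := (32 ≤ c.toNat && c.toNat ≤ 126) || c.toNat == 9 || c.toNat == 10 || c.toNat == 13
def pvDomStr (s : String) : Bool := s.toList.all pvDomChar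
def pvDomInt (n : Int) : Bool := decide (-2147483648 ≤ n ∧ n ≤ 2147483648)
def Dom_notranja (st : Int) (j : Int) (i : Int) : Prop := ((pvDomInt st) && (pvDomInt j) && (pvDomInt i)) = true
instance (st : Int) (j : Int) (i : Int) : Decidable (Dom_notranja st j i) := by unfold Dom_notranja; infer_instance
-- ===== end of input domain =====

-- B replaces A's string-building recursion by an idiomatic loop over range(j, st) that
-- collects "1 "/"0 " parts (with st//2 hoisted out) and joins them once; same return value on j ≤ st.

-- ===== PORT A =====
-- A recurses on j until j == st; the fuel (st - j).toNat encodes exactly that base case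
-- (fuel 0 ⟺ j = st under Pre_; for j > st the Python recursion never terminates, excluded by Pre_).
def notranjaAux (st i : Int) : Nat → Int → String
  | 0, _ => ""
  | n+1, j =>
    if i + j == st - 1 || i == j || PySem.Int.floordiv st 2 == i || PySem.Int.floordiv st 2 == j then
      "1 " ++ notranjaAux st i n (j+1)
    else
      "0 " ++ notranjaAux st i n (j+1)

def notranja (st : Int) (j : Int) (i : Int) : String :=
  notranjaAux st i (st - j).toNat j

-- ===== PORT B =====
def notranja_alt (st : Int) (j : Int) (i : Int) : String :=
  let half := PySem.Int.floordiv st 2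
  PySem.Str.join ""
    ((PySem.List.pyRange j st 1).map (fun k =>
      if i + k == st - 1 || i == k || half == i || half == k then "1 " else "0 "))

-- ===== PRECONDITION & SPEC =====
-- Pre_ excludes j > st, where the Python A recurses past the j == st base case and raises RecursionError.
def Pre_notranja (st : Int) (j : Int) (i : Int) : Prop := j ≤ st
instance (st : Int) (j : Int) (i : Int) : Decidable (Pre_notranja st j i) := by unfold Pre_notranja; infer_instance
def pvWitness_notranja : Int × Int × Int := (5, 0, 2)

def Spec_notranja (st : Int) (j : Int) (i : Int) (out : String) : Prop := out = notranja_alt st j i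
instance (st : Int) (j : Int) (i : Int) (out : String) : Decidable (Spec_notranja st j i out) := by unfold Spec_notranja; infer_instance

-- ===== CLAIM (what is proved, stated in full; the proofs are below) =====
def Claim_equal_notranja : Prop := ∀ (st : Int) (j : Int) (i : Int), Dom_notranja st j i → Pre_notranja st j i → Spec_notranja st j i (notranja st j i)

-- ===== LEMMAS AND PROOFS =====

theorem join_empty_cons (x : String) (xs : List String) :
    PySem.Str.join "" (x :: xs) = x ++ PySem.Str.join "" xs := by
  have h : ∀ (a : List Char) (l : List (List Char)),
      List.intercalate [] (a :: l) = a ++ List.intercalate [] l := by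
    intro a l; cases l <;> simp [List.intercalate]
  simp [PySem.Str.join, PySem.Chars.join, h]

theorem notranjaAux_eq (st i : Int) : ∀ (n : Nat) (j : Int), (st - j).toNat = n →
    notranjaAux st i n j =
      PySem.Str.join ""
        ((PySem.List.pyRange j st 1).map (fun k =>
          if i + k == st - 1 || i == k || PySem.Int.floordiv st 2 == i || PySem.Int.floordiv st 2 == k
          then "1 " else "0 ")) := by
  intro n
  induction n with
  | zero =>
    intro j hj
    have hle : st ≤ j := by omega
    rw [PySem.List.pyRange_one_eq_nil hle]
    simp [notranjaAux, PySem.Str.join, PySem.Chars.join, List.intercalate]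
  | succ n ih =>
    intro j hj
    have hlt : j < st := by omega
    rw [PySem.List.pyRange_one_cons hlt, List.map_cons, join_empty_cons,
        ← ih (j+1) (by omega)]
    simp only [notranjaAux]
    split_ifs <;> rfl

-- ===== VERDICT (by name: the statement is the Claim_ definition above) =====
theorem notranja_spec : Claim_equal_notranja := by
  intro st j i _ _
  unfold Spec_notranja notranja notranja_alt
  exact notranjaAux_eq st i _ j rfl
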